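-- pv_equiv track=rewrite | github.com/Din974/My_projects | autoCompletion/main.py | update_list_for_city_choosen
-- ===== SOURCE A (Python) =====
-- def update_list_for_city_choosen(my_list, ref):
--     new = []
--     city = []
--     number = []
--     streetType = []
--     streetName = []
--     for x in range(len(my_list[0])):
--         if my_list[0][x] == ref[0]:
--             city.append(my_list[0][x])
--             number.append(my_list[1][x])
--             streetType.append(my_list[2][x])
--             streetName.append(my_list[3][x])
--     new.append(city)
--     new.append(number)
--     new.append(streetType)
--     new.append(streetName)
--     return new
-- ===== SOURCE B (Python) =====
-- def update_list_for_city_choosen(my_list, ref):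
--     rows = list(zip(*my_list[:4]))
--     matches = [row for row in rows if row[0] == ref[0]]
--     if not matches:
--         return [[], [], [], []]
--     return [list(col) for col in zip(*matches)]
-- ===== Notes on version B (the rewrite author's own statement) =====
-- stated objective: idiomatic
-- what changed: Replaces A's index loop over range(len(my_list[0])) with interleaved appends into four accumulators by the idiomatic row-wise pipeline: transpose the first four parallel lists with zip(*my_list[:4]), filter whole rows on row[0] == ref[0], and unzip the surviving rows back into columns with zip(*matches) (explicit four-empty-lists fallback when nothing matches).
import Mathlib
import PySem

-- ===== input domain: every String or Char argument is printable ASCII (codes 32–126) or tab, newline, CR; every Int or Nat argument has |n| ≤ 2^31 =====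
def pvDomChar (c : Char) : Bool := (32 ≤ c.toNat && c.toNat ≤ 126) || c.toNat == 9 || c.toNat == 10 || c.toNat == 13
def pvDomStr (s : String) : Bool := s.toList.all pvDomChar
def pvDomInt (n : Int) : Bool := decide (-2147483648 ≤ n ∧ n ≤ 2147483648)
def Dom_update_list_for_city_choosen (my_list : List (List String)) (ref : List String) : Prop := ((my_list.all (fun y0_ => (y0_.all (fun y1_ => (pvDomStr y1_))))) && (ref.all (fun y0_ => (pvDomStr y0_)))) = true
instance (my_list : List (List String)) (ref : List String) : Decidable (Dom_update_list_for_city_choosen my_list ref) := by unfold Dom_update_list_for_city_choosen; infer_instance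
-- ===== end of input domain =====

-- B replaces A's index loop with four accumulators by a row-wise pipeline:
-- transpose (zip), filter rows, transpose back; idiomatic, same cost. Return value only.


-- ===== PORT A =====
-- Literal port of A: one loop over range(len(my_list[0])) appending, on a match,
-- into four accumulator lists (city, number, streetType, streetName).
def update_list_for_city_choosen (my_list : List (List String)) (ref : List String) : List (List String) :=
  let row0 := (PySem.List.pyGet? my_list 0).getD []
  let s := (PySem.List.pyRange 0 (row0.length : Int)).foldl
    (fun (s : List String × List String × List String × List String) x =>
      if (PySem.List.pyGet? row0 x).getD "" = (PySem.List.pyGet? ref 0).getD "" then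
        (s.1 ++ [(PySem.List.pyGet? row0 x).getD ""],
         s.2.1 ++ [(PySem.List.pyGet? ((PySem.List.pyGet? my_list 1).getD []) x).getD ""],
         s.2.2.1 ++ [(PySem.List.pyGet? ((PySem.List.pyGet? my_list 2).getD []) x).getD ""],
         s.2.2.2 ++ [(PySem.List.pyGet? ((PySem.List.pyGet? my_list 3).getD []) x).getD ""])
      else s)
    ([], [], [], [])
  [s.1, s.2.1, s.2.2.1, s.2.2.2]

-- ===== PORT B =====
-- pvZip rows = Python's zip(*rows): truncating transpose; used for both zips of Source B.
-- (termination: each step removes one element from every (nonempty) row)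
theorem pv_tail_sum (rows : List (List String))
    (h : rows.all (fun r => !r.isEmpty) = true) :
    ((rows.map List.tail).map List.length).sum + rows.length
      = (rows.map List.length).sum := by
  induction rows with
  | nil => simp
  | cons r t ih =>
    simp only [List.all_cons, Bool.and_eq_true] at h
    cases r with
    | nil => simp at h
    | cons x xr =>
      have := ih h.2
      simp only [List.map_cons, List.sum_cons, List.length_cons, List.tail_cons]
      omega

def pvZip (rows : List (List String)) : List (List String) :=
  if h : rows ≠ [] ∧ rows.all (fun r => !r.isEmpty) = true then
    rows.map (fun r => r.headD "") :: pvZip (rows.map List.tail)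
  else []
termination_by (rows.map List.length).sum
decreasing_by
  have h1 := pv_tail_sum rows h.2
  have h2 : 0 < rows.length := List.length_pos_of_ne_nil h.1
  simp only [List.map_map] at h1 ⊢
  simp only [Function.comp_def, List.length_tail] at h1 ⊢
  simp only [List.map_attach_eq_pmap, List.pmap_eq_map]
  omega

-- Literal port of B: rows = zip(*my_list[:4]); matched = [row for row in rows if
-- row[0] == ref[0]]; return [[],[],[],[]] if not matched else [list(col) for col in zip(*matched)].
def update_list_for_city_choosen_alt (my_list : List (List String)) (ref : List String) : List (List String) :=
  let rows := pvZip (PySem.List.slice my_list none (some 4))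
  let matched := rows.filter (fun row => row.headD "" == (PySem.List.pyGet? ref 0).getD "")
  if matched.isEmpty then [[], [], [], []]
  else pvZip matched

-- ===== PRECONDITION & SPEC =====
-- Pre_ = exactly the inputs on which the Python A returns (no IndexError): my_list
-- nonempty, ref nonempty whenever the first row is nonempty, and at every matching
-- index the rows 1..3 exist and are long enough.
def Pre_update_list_for_city_choosen (my_list : List (List String)) (ref : List String) : Prop :=
  my_list ≠ [] ∧
  (my_list.headD [] = [] ∨ ref ≠ []) ∧
  ∀ x < (my_list.headD []).length,
    (my_list.headD []).getD x "" = ref.headD "" →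
      3 < my_list.length ∧ x < (my_list.getD 1 []).length ∧
        x < (my_list.getD 2 []).length ∧ x < (my_list.getD 3 []).length
instance (my_list : List (List String)) (ref : List String) : Decidable (Pre_update_list_for_city_choosen my_list ref) := by unfold Pre_update_list_for_city_choosen; infer_instance

def pvWitness_update_list_for_city_choosen : List (List String) × List String :=
  ([["a", "b", "a"], ["1", "2", "3"], ["rue", "av", "bd"], ["X", "Y", "Z"]], ["a", "q"])

def Spec_update_list_for_city_choosen (my_list : List (List String)) (ref : List String) (out : List (List String)) : Prop := out = update_list_for_city_choosen_alt my_list ref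
instance (my_list : List (List String)) (ref : List String) (out : List (List String)) : Decidable (Spec_update_list_for_city_choosen my_list ref out) := by unfold Spec_update_list_for_city_choosen; infer_instance

-- ===== CLAIM (what is proved, stated in full; the proofs are below) =====
def Claim_equal_update_list_for_city_choosen : Prop := ∀ (my_list : List (List String)) (ref : List String), Dom_update_list_for_city_choosen my_list ref → Pre_update_list_for_city_choosen my_list ref → Spec_update_list_for_city_choosen my_list ref (update_list_for_city_choosen my_list ref)

-- ===== LEMMAS AND PROOFS =====

-- A's fold over any index list, from any accumulator, gathers exactly the selected
-- indices' entries of each row appended to the accumulators.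
theorem pv_fold_gather (row0 r1 r2 r3 : List String) (k : String) (l : List Int)
    (a0 a1 a2 a3 : List String) :
    l.foldl
      (fun (s : List String × List String × List String × List String) x =>
        if (PySem.List.pyGet? row0 x).getD "" = k then
          (s.1 ++ [(PySem.List.pyGet? row0 x).getD ""],
           s.2.1 ++ [(PySem.List.pyGet? r1 x).getD ""],
           s.2.2.1 ++ [(PySem.List.pyGet? r2 x).getD ""],
           s.2.2.2 ++ [(PySem.List.pyGet? r3 x).getD ""])
        else s)
      (a0, a1, a2, a3)
    = (a0 ++ (l.filterMap (fun j => if (PySem.List.pyGet? row0 j).getD "" = k then some j else none)).map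
            (fun i => (PySem.List.pyGet? row0 i).getD ""),
       a1 ++ (l.filterMap (fun j => if (PySem.List.pyGet? row0 j).getD "" = k then some j else none)).map
            (fun i => (PySem.List.pyGet? r1 i).getD ""),
       a2 ++ (l.filterMap (fun j => if (PySem.List.pyGet? row0 j).getD "" = k then some j else none)).map
            (fun i => (PySem.List.pyGet? r2 i).getD ""),
       a3 ++ (l.filterMap (fun j => if (PySem.List.pyGet? row0 j).getD "" = k then some j else none)).map
            (fun i => (PySem.List.pyGet? r3 i).getD "")) := by
  induction l generalizing a0 a1 a2 a3 with
  | nil => simp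
  | cons x xs ih =>
    by_cases h : (PySem.List.pyGet? row0 x).getD "" = k
    · simp [List.foldl_cons, h, ih]
    · simp [List.foldl_cons, h, ih]

-- each of A's four columns, in Nat-filter form
theorem pv_col_conv (r row0 : List String) (k : String) (l : List Nat) :
    ((l.map (fun (i : Nat) => (i : Int))).filterMap
        (fun j => if (PySem.List.pyGet? row0 j).getD "" = k then some j else none)).map
      (fun i => (PySem.List.pyGet? r i).getD "")
    = (l.filter (fun i => row0.getD i "" == k)).map (fun i => r.getD i "") := by
  induction l with
  | nil => simp
  | cons x xs ih =>
    have hc : (PySem.List.pyGet? row0 ((x : Nat) : Int)).getD "" = row0.getD x "" := by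
      simp [List.getD_eq_getElem?_getD]
    have hr : (PySem.List.pyGet? r ((x : Nat) : Int)).getD "" = r.getD x "" := by
      simp [List.getD_eq_getElem?_getD]
    rw [List.map_cons, List.filterMap_cons, List.filter_cons]
    by_cases h : row0.getD x "" = k
    · rw [if_pos (by rw [hc]; exact h),
         if_pos (by simpa [List.getD_eq_getElem?_getD] using h)]
      rw [List.map_cons, ih, hr, List.map_cons]
    · rw [if_neg (by rw [hc]; exact h),
         if_neg (by simpa [List.getD_eq_getElem?_getD] using h), ih]

theorem pv_range_cast (n : Nat) :
    PySem.List.pyRange 0 (n : Int) 1 = (List.range n).map (fun (i : Nat) => (i : Int)) := by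
  rw [PySem.List.pyRange_one]
  simp

-- pvZip of rows that all have length ≥ m, one of them exactly m: the m columns
theorem pv_pvZip_spec (m : Nat) : ∀ (rs : List (List String)), rs ≠ [] →
    (∀ r ∈ rs, m ≤ r.length) → (∃ r ∈ rs, r.length = m) →
    pvZip rs = (List.range m).map (fun i => rs.map (fun r => r.getD i "")) := by
  induction m with
  | zero =>
    intro rs hne hle hex
    obtain ⟨r, hr, hrl⟩ := hex
    rw [pvZip, dif_neg]
    · simp
    · rintro ⟨-, hall⟩
      rw [List.all_eq_true] at hall
      have := hall r hr
      simp [List.length_eq_zero_iff.mp hrl] at this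
  | succ n ih =>
    intro rs hne hle hex
    have hall : rs.all (fun r => !r.isEmpty) = true := by
      rw [List.all_eq_true]; intro r hr
      have hl := hle r hr
      simp only [Bool.not_eq_eq_eq_not, Bool.not_true, List.isEmpty_eq_false_iff, ne_eq]
      intro h; subst h; simp at hl
    rw [pvZip, dif_pos ⟨hne, hall⟩]
    rw [ih (rs.map List.tail) (by simp [hne]) ?h1 ?h2]
    case h1 =>
      intro t ht
      simp only [List.mem_map] at ht
      obtain ⟨r, hr, rfl⟩ := ht
      have := hle r hr
      simp only [List.length_tail]
      omega
    case h2 =>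
      obtain ⟨r, hr, hrl⟩ := hex
      exact ⟨r.tail, List.mem_map_of_mem hr, by simp [hrl]⟩
    rw [List.range_succ_eq_map, List.map_cons]
    congr 1
    · apply List.map_congr_left; intro r hr; cases r <;> simp [List.getD]
    · rw [List.map_map]
      apply List.map_congr_left
      intro i hi
      rw [List.map_map]
      apply List.map_congr_left
      intro r hr
      cases r <;> simp [List.getD]

-- the head of every row produced by pvZip is an element of the first input row
theorem pv_pvZip_head_mem (r0 : List String) : ∀ (rest : List (List String))
    (row : List String), row ∈ pvZip (r0 :: rest) → row.headD "" ∈ r0 := by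
  induction r0 with
  | nil =>
    intro rest row h
    rw [pvZip, dif_neg] at h
    · simp at h
    · rintro ⟨-, hall⟩; simp at hall
  | cons x xr ih =>
    intro rest row h
    rw [pvZip] at h
    by_cases hc : ((x :: xr) :: rest ≠ [] ∧ ((x :: xr) :: rest).all (fun r => !r.isEmpty) = true)
    · rw [dif_pos hc] at h
      rcases List.mem_cons.mp h with h1 | h2
      · subst h1; simp
      · simp only [List.map_cons, List.tail_cons] at h2
        exact List.mem_cons_of_mem _ (ih (rest.map List.tail) row h2)
    · rw [dif_neg hc] at h; simp at h

-- restrict a range-filter when the predicate only holds below m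
theorem pv_filter_range_le (p : Nat → Bool) (m n : Nat) (hmn : m ≤ n)
    (h : ∀ i, i < n → p i = true → i < m) :
    (List.range n).filter p = (List.range m).filter p := by
  rw [show n = m + (n - m) by omega, List.range_add, List.filter_append]
  have h2 : ((List.range (n - m)).map (m + ·)).filter p = [] := by
    rw [List.filter_eq_nil_iff]
    intro a ha
    simp only [List.mem_map, List.mem_range] at ha
    obtain ⟨x, hx, rfl⟩ := ha
    intro hp
    have := h (m + x) (by omega) hp
    omega
  simp [h2]

theorem update_list_for_city_choosen_spec : Claim_equal_update_list_for_city_choosen := by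
  intro L ref _ hPre
  obtain ⟨hL, hRef, hLen⟩ := hPre
  obtain ⟨r0, Lrest, rfl⟩ := List.exists_cons_of_ne_nil hL
  unfold Spec_update_list_for_city_choosen update_list_for_city_choosen update_list_for_city_choosen_alt
  simp only [PySem.List.pyGet?_zero_cons, Option.getD_some]
  rw [pv_fold_gather]
  simp only [List.nil_append]
  rw [pv_range_cast, pv_col_conv, pv_col_conv, pv_col_conv, pv_col_conv]
  have hslice : PySem.List.slice (r0 :: Lrest) none (some 4) = r0 :: Lrest.take 3 := by
    rw [PySem.List.slice_to (r0 :: Lrest) (b := 4) (by norm_num)]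
    rfl
  rw [hslice]
  by_cases hE : (List.range r0.length).filter
      (fun i => r0.getD i "" == (PySem.List.pyGet? ref 0).getD "") = []
  · -- no matching index: both sides are four empty lists
    have hnil : (pvZip (r0 :: Lrest.take 3)).filter
        (fun row => row.headD "" == (PySem.List.pyGet? ref 0).getD "") = [] := by
      rw [List.filter_eq_nil_iff]
      intro row hrow hb
      obtain ⟨i, hi, hgi⟩ := List.mem_iff_getElem.mp (pv_pvZip_head_mem r0 _ row hrow)
      have hmem : i ∈ (List.range r0.length).filter
          (fun i => r0.getD i "" == (PySem.List.pyGet? ref 0).getD "") := by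
        refine List.mem_filter.mpr ⟨List.mem_range.mpr hi, ?_⟩
        rw [List.getD_eq_getElem?_getD, List.getElem?_eq_getElem hi, Option.getD_some, hgi]
        exact hb
      rw [hE] at hmem
      simp at hmem
    rw [hE, hnil]
    simp
  · -- some index matches: Pre_ forces four rows, and both sides are the four columns
    obtain ⟨i0, hi0⟩ := List.exists_mem_of_ne_nil _ hE
    have hi0m := List.mem_filter.mp hi0
    have hi0lt : i0 < r0.length := List.mem_range.mp hi0m.1
    have hi0k : r0.getD i0 "" = (PySem.List.pyGet? ref 0).getD "" := by
      simpa using hi0m.2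
    have href : ref ≠ [] := by
      rcases hRef with h | h
      · rw [List.headD_cons] at h; subst h; simp at hi0lt
      · exact h
    obtain ⟨kr, refrest, rfl⟩ := List.exists_cons_of_ne_nil href
    have hk : (PySem.List.pyGet? (kr :: refrest) 0).getD "" = kr := by
      rw [PySem.List.pyGet?_zero_cons, Option.getD_some]
    simp only [List.headD_cons, hk] at hLen hi0k ⊢
    have hL4 : 3 < (r0 :: Lrest).length := (hLen i0 hi0lt hi0k).1
    rcases Lrest with _ | ⟨rb, L2⟩
    · simp at hL4
    rcases L2 with _ | ⟨rc, L3⟩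
    · simp at hL4
    rcases L3 with _ | ⟨rd, rest⟩
    · simp at hL4
    have hg1 : (PySem.List.pyGet? (r0 :: rb :: rc :: rd :: rest) 1).getD [] = rb := by
      have h : (1 : Int) = ((1 : Nat) : Int) := by norm_cast
      rw [h, PySem.List.pyGet?_natCast]; rfl
    have hg2 : (PySem.List.pyGet? (r0 :: rb :: rc :: rd :: rest) 2).getD [] = rc := by
      have h : (2 : Int) = ((2 : Nat) : Int) := by norm_cast
      rw [h, PySem.List.pyGet?_natCast]; rfl
    have hg3 : (PySem.List.pyGet? (r0 :: rb :: rc :: rd :: rest) 3).getD [] = rd := by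
      have h : (3 : Int) = ((3 : Nat) : Int) := by norm_cast
      rw [h, PySem.List.pyGet?_natCast]; rfl
    have htake : List.take 3 (rb :: rc :: rd :: rest) = [rb, rc, rd] := rfl
    rw [hg1, hg2, hg3, htake]
    simp only [hk] at hE hi0
    have hmin4 : ∀ r ∈ [r0, rb, rc, rd],
        min (min r0.length rb.length) (min rc.length rd.length) ≤ r.length := by
      intro r hr
      simp only [List.mem_cons, List.not_mem_nil, or_false] at hr
      rcases hr with rfl | rfl | rfl | rfl <;> omega
    have hex4 : ∃ r ∈ [r0, rb, rc, rd],
        r.length = min (min r0.length rb.length) (min rc.length rd.length) := by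
      have hd : min (min r0.length rb.length) (min rc.length rd.length) = r0.length ∨
          min (min r0.length rb.length) (min rc.length rd.length) = rb.length ∨
          min (min r0.length rb.length) (min rc.length rd.length) = rc.length ∨
          min (min r0.length rb.length) (min rc.length rd.length) = rd.length := by omega
      rcases hd with h | h | h | h
      · exact ⟨r0, by simp, h.symm⟩
      · exact ⟨rb, by simp, h.symm⟩
      · exact ⟨rc, by simp, h.symm⟩
      · exact ⟨rd, by simp, h.symm⟩
    rw [pv_pvZip_spec _ [r0, rb, rc, rd] (by simp) hmin4 hex4]
    simp only [List.map_cons, List.map_nil]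
    rw [List.filter_map]
    simp only [Function.comp_def, List.headD_cons]
    have e1 : (r0 :: rb :: rc :: rd :: rest).getD 1 [] = rb := rfl
    have e2 : (r0 :: rb :: rc :: rd :: rest).getD 2 [] = rc := rfl
    have e3 : (r0 :: rb :: rc :: rd :: rest).getD 3 [] = rd := rfl
    have hb0 := hLen i0 hi0lt hi0k
    rw [e1, e2, e3] at hb0
    have hi0' : i0 ∈ List.filter (fun i => r0.getD i "" == kr)
        (List.range (min (min r0.length rb.length) (min rc.length rd.length))) := by
      refine List.mem_filter.mpr ⟨List.mem_range.mpr (by omega), by simpa using hi0k⟩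
    have hmne : (List.filter (fun i => r0.getD i "" == kr)
          (List.range (min (min r0.length rb.length) (min rc.length rd.length)))).map
          (fun i => [r0.getD i "", rb.getD i "", rc.getD i "", rd.getD i ""]) ≠ [] :=
      List.ne_nil_of_mem (List.mem_map_of_mem hi0')
    rw [if_neg (by simp only [List.isEmpty_iff]; exact hmne)]
    rw [pv_pvZip_spec 4 _ hmne ?l4 ?e4]
    case l4 =>
      intro r hr
      simp only [List.mem_map] at hr
      obtain ⟨i, -, rfl⟩ := hr
      simp
    case e4 =>
      exact ⟨[r0.getD i0 "", rb.getD i0 "", rc.getD i0 "", rd.getD i0 ""],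
        List.mem_map_of_mem hi0', rfl⟩
    rw [show List.range 4 = [0, 1, 2, 3] from rfl]
    simp only [List.map_cons, List.map_nil, List.map_map, Function.comp_def]
    have hext : List.filter (fun i => r0.getD i "" == kr)
        (List.range (min (min r0.length rb.length) (min rc.length rd.length)))
        = List.filter (fun i => r0.getD i "" == kr) (List.range r0.length) := by
      refine (pv_filter_range_le _ _ _ (by omega) ?_).symm
      intro i hi hp
      have hb := hLen i hi (by simpa using hp)
      rw [e1, e2, e3] at hb
      omega
    rw [hext]
    simp
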